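-- pv_equiv track=rewrite | github.com/JadielTeofilo/General-Algorithms | src/leetcode/google_list/count_all_one_rectangles.py | find_subarrays_with_ones
-- ===== SOURCE A (Python) =====
-- from typing import List
--
-- def find_subarrays_with_ones(array: List[int]) -> int:
--     result: int = 0
--     ones_count: int = 0
--     for num in array:
--         if num == 1:
--             ones_count += 1
--         else:
--             ones_count = 0
--         result += ones_count
--     return result
-- ===== SOURCE B (Python) =====
-- from typing import List
--
-- def find_subarrays_with_ones(array: List[int]) -> int:
--     total: int = 0
--     i: int = 0
--     n: int = len(array)
--     while i < n:
--         if array[i] == 1: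
--             j = i
--             while j < n and array[j] == 1:
--                 j += 1
--             run_len = j - i
--             total += run_len * (run_len + 1) // 2
--             i = j
--         else:
--             i += 1
--     return total
-- ===== Notes on version B (the rewrite author's own statement) =====
-- stated objective: alternative
-- what changed: B partitions the array into maximal runs of consecutive ones and adds the closed-form L*(L+1)//2 per run, instead of A's per-element running-counter accumulation.
import Mathlib
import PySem

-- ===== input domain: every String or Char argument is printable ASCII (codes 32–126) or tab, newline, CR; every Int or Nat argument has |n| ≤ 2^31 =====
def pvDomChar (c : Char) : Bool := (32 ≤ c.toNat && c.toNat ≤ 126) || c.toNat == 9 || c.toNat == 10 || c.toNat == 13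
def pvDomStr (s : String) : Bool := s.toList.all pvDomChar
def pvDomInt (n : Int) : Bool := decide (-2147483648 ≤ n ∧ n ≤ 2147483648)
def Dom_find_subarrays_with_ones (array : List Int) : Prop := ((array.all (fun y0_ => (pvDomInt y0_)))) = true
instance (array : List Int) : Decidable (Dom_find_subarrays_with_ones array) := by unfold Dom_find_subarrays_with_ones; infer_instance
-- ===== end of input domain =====

-- B counts all-ones subarrays by summing run_len*(run_len+1)//2 over maximal runs of ones (alternative decomposition, same cost).
-- ===== PORT A =====
def find_subarrays_with_ones (array : List Int) : Int :=
  (array.foldl (fun (st : Int × Int) num =>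
      let oc := if num = 1 then st.2 + 1 else 0
      (st.1 + oc, oc)) (0, 0)).1

-- ===== PORT B =====
-- transcription of Source B: the outer while scans; on a one, the inner while consumes the
-- maximal run (takeWhile/dropWhile) and adds run_len*(run_len+1)//2 to the total.
def fswoGo : List Int → Int
  | [] => 0
  | x :: xs =>
    if x = 1 then
      let run := List.takeWhile (fun y => y == 1) (x :: xs)
      let L : Int := run.length
      PySem.Int.floordiv (L * (L + 1)) 2 + fswoGo (List.dropWhile (fun y => y == 1) (x :: xs))
    else
      fswoGo xs
termination_by l => l.length
decreasing_by
  · simp only [List.dropWhile]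
    simp_all
    exact List.length_dropWhile_le _ _
  · simp

def find_subarrays_with_ones_alt (array : List Int) : Int := fswoGo array

-- ===== PRECONDITION & SPEC =====
def Spec_find_subarrays_with_ones (array : List Int) (out : Int) : Prop := out = find_subarrays_with_ones_alt array
instance (array : List Int) (out : Int) : Decidable (Spec_find_subarrays_with_ones array out) := by unfold Spec_find_subarrays_with_ones; infer_instance

-- ===== CLAIM (what is proved, stated in full; the proofs are below) =====
def Claim_equal_find_subarrays_with_ones : Prop := ∀ (array : List Int), Dom_find_subarrays_with_ones array → Spec_find_subarrays_with_ones array (find_subarrays_with_ones array)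

-- ===== LEMMAS AND PROOFS =====

-- A's fold step
def fswoStep (st : Int × Int) (num : Int) : Int × Int :=
  let oc := if num = 1 then st.2 + 1 else 0
  (st.1 + oc, oc)

lemma fswo_step_eq : (fun (st : Int × Int) num =>
      let oc := if num = 1 then st.2 + 1 else 0
      (st.1 + oc, oc)) = fswoStep := rfl

-- A's added sum starting from counter c
def fswoS (c : Int) (l : List Int) : Int := (l.foldl fswoStep (0, c)).1

lemma fswo_shift (l : List Int) : ∀ r c : Int,
    (l.foldl fswoStep (r, c)).1 = r + (l.foldl fswoStep (0, c)).1 := by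
  induction l with
  | nil => intro r c; simp [List.foldl]
  | cons x xs ih =>
    intro r c
    simp only [List.foldl, fswoStep]
    rw [ih]
    conv_rhs => rw [ih]
    ring_nf

lemma fswoS_cons_one (c : Int) (xs : List Int) :
    fswoS c (1 :: xs) = (c + 1) + fswoS (c + 1) xs := by
  simp only [fswoS, List.foldl, fswoStep]
  rw [fswo_shift]
  simp


lemma fswoS_cons_ne (c x : Int) (hx : x ≠ 1) (xs : List Int) :
    fswoS c (x :: xs) = fswoS 0 xs := by
  simp [fswoS, List.foldl, fswoStep, hx]

def fswoTri : Nat → Int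
  | 0 => 0
  | L + 1 => (L + 1) + fswoTri L

lemma fswoTri_eq (L : Nat) : fswoTri L = PySem.Int.floordiv ((L : Int) * ((L : Int) + 1)) 2 := by
  induction L with
  | zero => simp [fswoTri, PySem.Int.floordiv]
  | succ n ih =>
    rw [fswoTri, ih, PySem.Int.floordiv_eq_ediv_of_pos (by omega),
        PySem.Int.floordiv_eq_ediv_of_pos (by omega)]
    obtain ⟨k, hk⟩ := Int.even_mul_succ_self (n : Int)
    have h1 : ((n + 1 : Nat) : Int) * (((n + 1 : Nat) : Int) + 1)
        = 2 * ((n : Int) + 1) + ((n : Int) * ((n : Int) + 1)) := by push_cast; ring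
    rw [h1, hk]
    omega

lemma fswoS_run (L : Nat) : ∀ (c : Int) (rest : List Int),
    fswoS c (List.replicate L 1 ++ rest) = L * c + fswoTri L + fswoS (c + L) rest := by
  induction L with
  | zero => intro c rest; simp [fswoTri]
  | succ n ih =>
    intro c rest
    rw [List.replicate_succ, List.cons_append, fswoS_cons_one, ih]
    simp only [fswoTri]
    push_cast
    ring

lemma fswoS_head_reset (c : Int) (l : List Int)
    (h : l = [] ∨ ∃ x xs, l = x :: xs ∧ x ≠ 1) : fswoS c l = fswoS 0 l := by
  rcases h with h | ⟨x, xs, rfl, hx⟩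
  · subst h; rfl
  · rw [fswoS_cons_ne c x hx, fswoS_cons_ne 0 x hx]

lemma fswo_main (l : List Int) : fswoS 0 l = fswoGo l := by
  induction hn : l.length using Nat.strong_induction_on generalizing l with
  | _ n ih =>
  match l with
  | [] => simp [fswoS, List.foldl, fswoGo]
  | x :: xs =>
    by_cases hx : x = 1
    · subst hx
      rw [fswoGo, if_pos rfl]
      have hsplit : List.takeWhile (fun y => y == 1) (1 :: xs)
          ++ List.dropWhile (fun y => y == 1) (1 :: xs) = 1 :: xs :=
        List.takeWhile_append_dropWhile
      have hrep : List.takeWhile (fun y => y == 1) (1 :: xs)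
          = List.replicate (List.takeWhile (fun y => y == 1) (1 :: xs)).length 1 := by
        apply List.eq_replicate_of_mem
        intro y hy
        have := List.mem_takeWhile_imp hy
        simpa using this
      have hrest_shape : List.dropWhile (fun y => y == 1) (1 :: xs) = []
          ∨ ∃ z zs, List.dropWhile (fun y => y == 1) (1 :: xs) = z :: zs ∧ z ≠ 1 := by
        cases hr : List.dropWhile (fun y => y == 1) (1 :: xs) with
        | nil => exact Or.inl rfl
        | cons z zs =>
          refine Or.inr ⟨z, zs, rfl, ?_⟩
          have h2 := List.head?_dropWhile_not (fun y => y == 1) (1 :: xs)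
          rw [hr] at h2
          simpa using h2
      have hlenrun : 0 < (List.takeWhile (fun y => y == 1) (1 :: xs)).length := by
        simp [List.takeWhile]
      have hlen : (List.takeWhile (fun y => y == 1) (1 :: xs)).length
          + (List.dropWhile (fun y => y == 1) (1 :: xs)).length = n := by
        have h3 := congrArg List.length hsplit
        rw [List.length_append] at h3
        rw [h3, hn]
      calc fswoS 0 (1 :: xs)
          = fswoS 0 (List.takeWhile (fun y => y == 1) (1 :: xs)
              ++ List.dropWhile (fun y => y == 1) (1 :: xs)) := by rw [hsplit]
        _ = fswoS 0 (List.replicate (List.takeWhile (fun y => y == 1) (1 :: xs)).length 1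
              ++ List.dropWhile (fun y => y == 1) (1 :: xs)) := by rw [← hrep]
        _ = (List.takeWhile (fun y => y == 1) (1 :: xs)).length * 0
              + fswoTri (List.takeWhile (fun y => y == 1) (1 :: xs)).length
              + fswoS (0 + (List.takeWhile (fun y => y == 1) (1 :: xs)).length)
                  (List.dropWhile (fun y => y == 1) (1 :: xs)) := fswoS_run _ _ _
        _ = fswoTri (List.takeWhile (fun y => y == 1) (1 :: xs)).length
              + fswoS 0 (List.dropWhile (fun y => y == 1) (1 :: xs)) := by
              rw [fswoS_head_reset _ _ hrest_shape]; ring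
        _ = _ := by
              rw [fswoTri_eq, ih (List.dropWhile (fun y => y == 1) (1 :: xs)).length
                (by omega) _ rfl]
    · rw [fswoGo, if_neg hx]
      rw [fswoS_cons_ne 0 x hx]
      have hxs : xs.length + 1 = n := by simpa using hn
      exact ih xs.length (by omega) xs rfl

-- ===== VERDICT (by name: the statement is the Claim_ definition above) =====
theorem find_subarrays_with_ones_spec : Claim_equal_find_subarrays_with_ones := by
  intro array _
  show _ = _
  rw [find_subarrays_with_ones, find_subarrays_with_ones_alt, fswo_step_eq, ← fswo_main]
  rfl
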